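-- pv_equiv track=rewrite | github.com/pyhpaul/temu-y2-women | temu_y2_women/evidence_promotion.py | _build_report_summary
-- ===== SOURCE A (Python) =====
-- from typing import Any
--
-- def _build_report_summary(records: list[dict[str, Any]]) -> dict[str, int]:
--     accepted = sum(1 for record in records if record["decision"] == "accept")
--     rejected = sum(1 for record in records if record["decision"] == "reject")
--     created = sum(1 for record in records if record["decision"] == "accept" and record["merge_action"] == "create")
--     updated = sum(1 for record in records if record["decision"] == "accept" and record["merge_action"] == "update")
--     return {
--         "accepted": accepted,
--         "rejected": rejected,
--         "created": created,
--         "updated": updated,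
--     }
-- ===== SOURCE B (Python) =====
-- def _build_report_summary(records):
--     accepted = rejected = created = updated = 0
--     for record in records:
--         decision = record["decision"]
--         if decision == "accept":
--             accepted += 1
--             merge_action = record["merge_action"]
--             if merge_action == "create":
--                 created += 1
--             elif merge_action == "update":
--                 updated += 1
--         elif decision == "reject":
--             rejected += 1
--     return {
--         "accepted": accepted,
--         "rejected": rejected,
--         "created": created,
--         "updated": updated,
--     }
-- ===== Notes on version B (the rewrite author's own statement) =====
-- stated objective: simpler
-- what changed: Replaces A's four separate generator-expression passes over records with a single explicit loop maintaining four counters, reading merge_action only inside the accept branch.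
import Mathlib
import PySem

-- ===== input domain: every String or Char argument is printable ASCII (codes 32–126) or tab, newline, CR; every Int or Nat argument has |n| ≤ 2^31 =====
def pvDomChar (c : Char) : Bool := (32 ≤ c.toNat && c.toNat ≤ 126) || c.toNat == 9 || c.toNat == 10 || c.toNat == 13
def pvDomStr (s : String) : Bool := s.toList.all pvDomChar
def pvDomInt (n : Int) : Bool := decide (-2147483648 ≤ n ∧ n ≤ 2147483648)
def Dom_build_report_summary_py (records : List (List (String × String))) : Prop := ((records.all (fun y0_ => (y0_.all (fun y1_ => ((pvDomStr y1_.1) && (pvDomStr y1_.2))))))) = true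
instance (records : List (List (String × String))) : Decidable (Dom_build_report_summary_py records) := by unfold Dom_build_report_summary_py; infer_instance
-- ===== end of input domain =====

-- B replaces A's four separate counting passes over records with a single loop over
-- four counters (objective: simpler -- one explicit pass instead of four passes).


-- record[k]: first-match lookup in the association list (Python dict access; none = KeyError)
def pvLookup (r : List (String × String)) (k : String) : Option String :=
  (r.find? (fun p => p.1 == k)).map Prod.snd

-- ===== PORT A =====
-- Four generator-expression sums, each its own pass over records.
def build_report_summary_py (records : List (List (String × String))) : List (String × Int) :=
  let accepted : Int := records.foldl
    (fun acc r => if pvLookup r "decision" == some "accept" then acc + 1 else acc) 0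
  let rejected : Int := records.foldl
    (fun acc r => if pvLookup r "decision" == some "reject" then acc + 1 else acc) 0
  let created : Int := records.foldl
    (fun acc r => if pvLookup r "decision" == some "accept" && pvLookup r "merge_action" == some "create" then acc + 1 else acc) 0
  let updated : Int := records.foldl
    (fun acc r => if pvLookup r "decision" == some "accept" && pvLookup r "merge_action" == some "update" then acc + 1 else acc) 0
  [("accepted", accepted), ("rejected", rejected), ("created", created), ("updated", updated)]

-- ===== PORT B =====
-- One pass, four counters; merge_action is read only inside the accept branch.
def pvStepB (s : Int × Int × Int × Int) (r : List (String × String)) : Int × Int × Int × Int :=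
  let (a, rj, c, u) := s
  if pvLookup r "decision" == some "accept" then
    let m := pvLookup r "merge_action"
    if m == some "create" then (a + 1, rj, c + 1, u)
    else if m == some "update" then (a + 1, rj, c, u + 1)
    else (a + 1, rj, c, u)
  else if pvLookup r "decision" == some "reject" then (a, rj + 1, c, u)
  else (a, rj, c, u)

def build_report_summary_py_alt (records : List (List (String × String))) : List (String × Int) :=
  let (a, rj, c, u) := records.foldl pvStepB (0, 0, 0, 0)
  [("accepted", a), ("rejected", rj), ("created", c), ("updated", u)]

-- ===== PRECONDITION & SPEC =====
-- Pre_ excludes exactly the inputs on which Python A raises KeyError: a record with no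
-- "decision" key, or an "accept" record with no "merge_action" key.
def Pre_build_report_summary_py (records : List (List (String × String))) : Prop :=
  ∀ r ∈ records, (pvLookup r "decision").isSome = true ∧
    (pvLookup r "decision" = some "accept" → (pvLookup r "merge_action").isSome = true)
instance (records : List (List (String × String))) : Decidable (Pre_build_report_summary_py records) := by unfold Pre_build_report_summary_py; infer_instance

def pvWitness_build_report_summary_py : (List (List (String × String))) :=
  [[("decision", "accept"), ("merge_action", "create")], [("decision", "reject")]]

def Spec_build_report_summary_py (records : List (List (String × String))) (out : List (String × Int)) : Prop := out = build_report_summary_py_alt records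
instance (records : List (List (String × String))) (out : List (String × Int)) : Decidable (Spec_build_report_summary_py records out) := by unfold Spec_build_report_summary_py; infer_instance

-- ===== CLAIM (what is proved, stated in full; the proofs are below) =====
def Claim_equal_build_report_summary_py : Prop := ∀ (records : List (List (String × String))), Dom_build_report_summary_py records → Pre_build_report_summary_py records → Spec_build_report_summary_py records (build_report_summary_py records)

-- ===== LEMMAS AND PROOFS =====

-- B's single step updates the four counters exactly as A's four per-pass steps do.
theorem pvStepB_eq (r : List (String × String)) (a rj c u : Int) :
    pvStepB (a, rj, c, u) r =
      ((if pvLookup r "decision" == some "accept" then a + 1 else a),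
       (if pvLookup r "decision" == some "reject" then rj + 1 else rj),
       (if pvLookup r "decision" == some "accept" && pvLookup r "merge_action" == some "create" then c + 1 else c),
       (if pvLookup r "decision" == some "accept" && pvLookup r "merge_action" == some "update" then u + 1 else u)) := by
  unfold pvStepB
  rcases hd : pvLookup r "decision" with _ | d
  · simp
  · rcases hm : pvLookup r "merge_action" with _ | m
    · simp only []
      by_cases hda : d = "accept" <;> by_cases hdr : d = "reject" <;>
        simp_all
    · simp only []
      by_cases hda : d = "accept" <;> by_cases hdr : d = "reject" <;>
        by_cases hmc : m = "create" <;> by_cases hmu : m = "update" <;>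
        simp_all

theorem pvFoldB_eq (records : List (List (String × String))) (a rj c u : Int) :
    records.foldl pvStepB (a, rj, c, u) =
      (records.foldl (fun acc r => if pvLookup r "decision" == some "accept" then acc + 1 else acc) a,
       records.foldl (fun acc r => if pvLookup r "decision" == some "reject" then acc + 1 else acc) rj,
       records.foldl (fun acc r => if pvLookup r "decision" == some "accept" && pvLookup r "merge_action" == some "create" then acc + 1 else acc) c,
       records.foldl (fun acc r => if pvLookup r "decision" == some "accept" && pvLookup r "merge_action" == some "update" then acc + 1 else acc) u) := by
  induction records generalizing a rj c u with
  | nil => rfl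
  | cons r rest ih => simp only [List.foldl_cons, pvStepB_eq, ih]

-- ===== VERDICT (by name: the statement is the Claim_ definition above) =====
theorem build_report_summary_py_spec : Claim_equal_build_report_summary_py := by
  intro records _ _
  unfold Spec_build_report_summary_py build_report_summary_py build_report_summary_py_alt
  rw [pvFoldB_eq]
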